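-- pv_equiv track=rewrite | github.com/NVIDIA-Merlin/distributed-embeddings | distributed_embeddings/python/layers/dist_model_parallel.py | create_row_sliced_configs
-- ===== SOURCE A (Python) =====
-- def create_row_sliced_configs(global_row_configs, world_size):
--   # initial test code. not considering corner cases
--   sliced_configs, offsets = [], []
--   for orig_config in global_row_configs:
--     sliced_config, offset = [], []
--     cur_offset = 0
--     row_per_slice = orig_config['input_dim'] // world_size
--     remainder = orig_config['input_dim'] % world_size
--     for i in range(world_size):
--       config = orig_config.copy()
--       config['input_dim'] = row_per_slice
--       if i < remainder:
--         config['input_dim'] += 1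
--       sliced_config.append(config)
--       offset.append(cur_offset)
--       cur_offset -= config['input_dim']
--     sliced_configs.append(sliced_config)
--     offsets.append(offset)
--   # re-divide lists by rank
--   sliced_configs = [list(rank_configs) for rank_configs in zip(*sliced_configs)]
--   offsets = [list(rank_offsets) for rank_offsets in zip(*offsets)]
--   return sliced_configs, offsets
-- ===== SOURCE B (Python) =====
-- def create_row_sliced_configs(global_row_configs, world_size):
--   # rank-major: build each rank's list directly, offset in closed form
--   if not global_row_configs:
--     return [], []
--   sliced_configs, offsets = [], []
--   for i in range(world_size):
--     rank_configs, rank_offsets = [], []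
--     for orig_config in global_row_configs:
--       dim = orig_config['input_dim']
--       row_per_slice = dim // world_size
--       remainder = dim % world_size
--       config = orig_config.copy()
--       config['input_dim'] = row_per_slice + (1 if i < remainder else 0)
--       rank_configs.append(config)
--       rank_offsets.append(-(i * row_per_slice + min(i, remainder)))
--     sliced_configs.append(rank_configs)
--     offsets.append(rank_offsets)
--   return sliced_configs, offsets
-- ===== Notes on version B (the rewrite author's own statement) =====
-- stated objective: alternative
-- what changed: B iterates rank-major (outer loop over ranks), producing the rank-indexed output lists directly instead of building config-major lists and transposing with zip(*), and computes each offset by the closed form -(i*row_per_slice + min(i, remainder)) instead of a running accumulator.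
import Mathlib
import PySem

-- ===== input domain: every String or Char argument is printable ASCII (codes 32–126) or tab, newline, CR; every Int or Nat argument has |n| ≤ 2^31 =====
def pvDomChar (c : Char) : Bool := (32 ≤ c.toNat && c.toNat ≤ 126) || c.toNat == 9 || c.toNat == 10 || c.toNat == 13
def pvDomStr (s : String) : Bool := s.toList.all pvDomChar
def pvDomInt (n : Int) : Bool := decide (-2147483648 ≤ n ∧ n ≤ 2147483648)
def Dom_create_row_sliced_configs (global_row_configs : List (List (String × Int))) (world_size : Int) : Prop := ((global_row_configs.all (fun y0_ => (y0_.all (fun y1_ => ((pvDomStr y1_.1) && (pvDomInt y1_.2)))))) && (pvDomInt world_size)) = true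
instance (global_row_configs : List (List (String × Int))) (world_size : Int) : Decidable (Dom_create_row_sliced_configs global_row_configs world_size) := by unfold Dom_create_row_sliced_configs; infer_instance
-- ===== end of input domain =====

-- B builds the rank-indexed output lists directly (rank-major loop, closed-form offsets) instead of
-- config-major lists transposed with zip(*); equal cost, different decomposition (objective: alternative).

-- ===== PORT A =====
-- port of zip(*xss) (list of the tuples, as lists): truncates at the first exhausted row;
-- fuel = first row's length bounds the number of produced tuples, so this is exact
def pvMapHeads {α : Type} : List (List α) → Option (List α × List (List α))
  | [] => some ([], [])
  | [] :: _ => none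
  | (h :: t) :: rest => (pvMapHeads rest).map (fun p => (h :: p.1, t :: p.2))

def pvZipGo {α : Type} : Nat → List (List α) → List (List α)
  | 0, _ => []
  | n + 1, xss =>
    match pvMapHeads xss with
    | none => []
    | some (hs, ts) => hs :: pvZipGo n ts

def pvZipStar {α : Type} (xss : List (List α)) : List (List α) :=
  match xss with
  | [] => []
  | r :: _ => pvZipGo r.length xss

-- body of A's inner 'for i in range(world_size)' loop; state = (sliced_config, offset, cur_offset)
def pvInnerStepA (d : PySem.Dict String Int) (row_per_slice remainder : Int)
    (acc : List (PySem.Dict String Int) × List Int × Int) (i : Int) :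
    List (PySem.Dict String Int) × List Int × Int :=
  let config := d.insert "input_dim" row_per_slice
  let config := if i < remainder then config.insert "input_dim" (config.getD "input_dim" 0 + 1) else config
  (acc.1 ++ [config], acc.2.1 ++ [acc.2.2], acc.2.2 - config.getD "input_dim" 0)

-- A's per-config work: compute row_per_slice/remainder, run the range loop
def pvSliceLoopA (d : PySem.Dict String Int) (world_size : Int) :
    List (PySem.Dict String Int) × List Int :=
  let row_per_slice := PySem.Int.floordiv (d.getD "input_dim" 0) world_size
  let remainder := PySem.Int.mod (d.getD "input_dim" 0) world_size
  let res := (PySem.List.pyRange 0 world_size 1).foldl (pvInnerStepA d row_per_slice remainder) ([], [], 0)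
  (res.1, res.2.1)

-- body of A's outer loop: append this config's slice list and offset list
def pvOuterStepA (world_size : Int)
    (acc : List (List (List (String × Int))) × List (List Int)) (cfg : List (String × Int)) :
    List (List (List (String × Int))) × List (List Int) :=
  let r := pvSliceLoopA (PySem.Dict.mk cfg) world_size
  (acc.1 ++ [r.1.map PySem.Dict.items], acc.2 ++ [r.2])

def create_row_sliced_configs (global_row_configs : List (List (String × Int))) (world_size : Int) :
    (List (List (List (String × Int)))) × List (List Int) :=
  let acc := global_row_configs.foldl (pvOuterStepA world_size) ([], [])
  (pvZipStar acc.1, pvZipStar acc.2)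

-- ===== PORT B =====
-- body of B's inner 'for orig_config in global_row_configs' loop
def pvCfgStepB (world_size i : Int)
    (r : List (List (String × Int)) × List Int) (cfg : List (String × Int)) :
    List (List (String × Int)) × List Int :=
  let d := PySem.Dict.mk cfg
  let dim := d.getD "input_dim" 0
  let row_per_slice := PySem.Int.floordiv dim world_size
  let remainder := PySem.Int.mod dim world_size
  let config := d.insert "input_dim" (row_per_slice + (if i < remainder then 1 else 0))
  (r.1 ++ [config.items], r.2 ++ [-(i * row_per_slice + min i remainder)])

-- one rank's (rank_configs, rank_offsets)
def pvRowB (global_row_configs : List (List (String × Int))) (world_size i : Int) :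
    List (List (String × Int)) × List Int :=
  global_row_configs.foldl (pvCfgStepB world_size i) ([], [])

def create_row_sliced_configs_alt (global_row_configs : List (List (String × Int))) (world_size : Int) :
    (List (List (List (String × Int)))) × List (List Int) :=
  if global_row_configs = [] then ([], [])
  else
    (PySem.List.pyRange 0 world_size 1).foldl
      (fun acc i =>
        let row := pvRowB global_row_configs world_size i
        (acc.1 ++ [row.1], acc.2 ++ [row.2]))
      ([], [])

-- ===== PRECONDITION & SPEC =====
-- Pre_ excludes world_size = 0 with a nonempty config list (A raises ZeroDivisionError) and configs
-- missing the key 'input_dim' (A raises KeyError); it also excludes association lists with duplicate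
-- keys, which do not represent any Python dict.
def Pre_create_row_sliced_configs (global_row_configs : List (List (String × Int))) (world_size : Int) : Prop :=
  (global_row_configs ≠ [] → world_size ≠ 0) ∧
  ∀ cfg ∈ global_row_configs, "input_dim" ∈ cfg.map Prod.fst ∧ (cfg.map Prod.fst).Nodup

instance (global_row_configs : List (List (String × Int))) (world_size : Int) : Decidable (Pre_create_row_sliced_configs global_row_configs world_size) := by unfold Pre_create_row_sliced_configs; infer_instance

def pvWitness_create_row_sliced_configs : (List (List (String × Int))) × Int :=
  ([[("input_dim", 5), ("trainable", 1)]], 2)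

def Spec_create_row_sliced_configs (global_row_configs : List (List (String × Int))) (world_size : Int) (out : (List (List (List (String × Int)))) × List (List Int)) : Prop := out = create_row_sliced_configs_alt global_row_configs world_size
instance (global_row_configs : List (List (String × Int))) (world_size : Int) (out : (List (List (List (String × Int)))) × List (List Int)) : Decidable (Spec_create_row_sliced_configs global_row_configs world_size out) := by unfold Spec_create_row_sliced_configs; infer_instance

-- ===== CLAIM (what is proved, stated in full; the proofs are below) =====
def Claim_equal_create_row_sliced_configs : Prop := ∀ (global_row_configs : List (List (String × Int))) (world_size : Int), Dom_create_row_sliced_configs global_row_configs world_size → Pre_create_row_sliced_configs global_row_configs world_size → Spec_create_row_sliced_configs global_row_configs world_size (create_row_sliced_configs global_row_configs world_size)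

-- ===== LEMMAS AND PROOFS =====

-- closed forms for one slice: the resized config and the offset of rank i
def pvCfgF (d : PySem.Dict String Int) (world_size i : Int) : PySem.Dict String Int :=
  d.insert "input_dim"
    (PySem.Int.floordiv (d.getD "input_dim" 0) world_size +
      (if i < PySem.Int.mod (d.getD "input_dim" 0) world_size then 1 else 0))

def pvOffF (d : PySem.Dict String Int) (world_size i : Int) : Int :=
  -(i * PySem.Int.floordiv (d.getD "input_dim" 0) world_size +
      min i (PySem.Int.mod (d.getD "input_dim" 0) world_size))

theorem pvMapHeads_map {α β : Type} (a : α → β) (t : α → List β) (g : List α) :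
    pvMapHeads (g.map (fun c => a c :: t c)) = some (g.map a, g.map t) := by
  induction g with
  | nil => rfl
  | cons c g ih => simp [pvMapHeads, ih]

theorem pvZipGo_map {α β γ : Type} (g : List α) (f : α → γ → β) (idx : List γ) :
    pvZipGo idx.length (g.map (fun c => idx.map (fun i => f c i))) =
      idx.map (fun i => g.map (fun c => f c i)) := by
  induction idx with
  | nil => rfl
  | cons i idx ih =>
    show pvZipGo (idx.length + 1) (g.map (fun c => f c i :: idx.map (fun j => f c j))) = _
    rw [pvZipGo, pvMapHeads_map]
    simp only [List.map_cons]
    exact congrArg _ (ih)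

theorem pvZipStar_map {α β γ : Type} (g : List α) (hg : g ≠ []) (idx : List γ) (f : α → γ → β) :
    pvZipStar (g.map (fun c => idx.map (fun i => f c i))) =
      idx.map (fun i => g.map (fun c => f c i)) := by
  cases g with
  | nil => exact absurd rfl hg
  | cons c g' =>
    show pvZipGo (idx.map (fun i => f c i)).length _ = _
    rw [List.length_map]
    exact pvZipGo_map (c :: g') f idx

-- A's outer loop appends one entry per config
theorem pvOuterA_acc (world_size : Int) (l : List (List (String × Int)))
    (a : List (List (List (String × Int)))) (b : List (List Int)) :
    l.foldl (pvOuterStepA world_size) (a, b) =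
      (a ++ l.map (fun cfg => (pvSliceLoopA (PySem.Dict.mk cfg) world_size).1.map PySem.Dict.items),
       b ++ l.map (fun cfg => (pvSliceLoopA (PySem.Dict.mk cfg) world_size).2)) := by
  induction l generalizing a b with
  | nil => simp
  | cons cfg l ih => simp [List.foldl_cons, pvOuterStepA, ih]

-- B's inner loop appends one entry per config
theorem pvRowB_eq (g : List (List (String × Int))) (world_size i : Int)
    (a : List (List (String × Int))) (b : List Int) :
    g.foldl (pvCfgStepB world_size i) (a, b) =
      (a ++ g.map (fun cfg => (pvCfgF (PySem.Dict.mk cfg) world_size i).items),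
       b ++ g.map (fun cfg => pvOffF (PySem.Dict.mk cfg) world_size i)) := by
  induction g generalizing a b with
  | nil => simp
  | cons cfg g ih => simp [List.foldl_cons, pvCfgStepB, pvCfgF, pvOffF, ih]

-- B's outer loop appends one row per rank
theorem pvOuterB_acc (g : List (List (String × Int))) (world_size : Int) (l : List Int)
    (a : List (List (List (String × Int)))) (b : List (List Int)) :
    l.foldl (fun acc i =>
        let row := pvRowB g world_size i
        (acc.1 ++ [row.1], acc.2 ++ [row.2])) (a, b) =
      (a ++ l.map (fun i => (pvRowB g world_size i).1), b ++ l.map (fun i => (pvRowB g world_size i).2)) := by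
  induction l generalizing a b with
  | nil => simp
  | cons i l ih => simp [List.foldl_cons, ih]

-- A's one inner-loop step produces exactly the closed-form config
theorem pvStepA_cfg (d : PySem.Dict String Int) (rps rem i : Int) :
    (if i < rem then (d.insert "input_dim" rps).insert "input_dim"
        ((d.insert "input_dim" rps).getD "input_dim" 0 + 1)
      else d.insert "input_dim" rps) =
      d.insert "input_dim" (rps + (if i < rem then 1 else 0)) := by
  split_ifs with h
  · rw [PySem.Dict.getD_insert_self, PySem.Dict.insert_insert_self]
  · simp

-- A's accumulator loop over range(m), characterised: lists of closed-form slices, cur_offset closed form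
theorem pvInnerA_aux (d : PySem.Dict String Int) (world_size : Int)
    (hrem : 0 ≤ PySem.Int.mod (d.getD "input_dim" 0) world_size) (m : Nat) :
    ((List.range m).map (fun (k : Nat) => (k : Int))).foldl
        (pvInnerStepA d (PySem.Int.floordiv (d.getD "input_dim" 0) world_size)
          (PySem.Int.mod (d.getD "input_dim" 0) world_size)) ([], [], 0) =
      ((List.range m).map (fun (k : Nat) => pvCfgF d world_size (k : Int)),
       (List.range m).map (fun (k : Nat) => pvOffF d world_size (k : Int)),
       -((m : Int) * PySem.Int.floordiv (d.getD "input_dim" 0) world_size +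
          min (m : Int) (PySem.Int.mod (d.getD "input_dim" 0) world_size))) := by
  set rps := PySem.Int.floordiv (d.getD "input_dim" 0) world_size with hrps
  set rem := PySem.Int.mod (d.getD "input_dim" 0) world_size with hremdef
  induction m with
  | zero => simp; omega
  | succ m ih =>
    rw [List.range_succ, List.map_append, List.foldl_append, ih]
    simp only [List.map_cons, List.map_nil, List.foldl_cons, List.foldl_nil, pvInnerStepA,
      List.map_append]
    refine Prod.ext ?_ (Prod.ext ?_ ?_)
    · simp only [pvCfgF, ← hrps, ← hremdef]
      refine congrArg (fun x => _ ++ [x]) ?_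
      rw [pvStepA_cfg]
    · simp [pvOffF, ← hrps, ← hremdef]
    · rw [pvStepA_cfg]
      simp only [PySem.Dict.getD_insert_self]
      have hmul : ((m : Int) + 1) * rps = (m : Int) * rps + rps := by ring
      push_cast
      rw [hmul]
      by_cases h : (m : Int) < rem <;> simp [h] <;> omega

-- A's per-config slice loop equals the map of the closed forms
theorem pvSliceLoopA_eq (d : PySem.Dict String Int) (world_size : Int) :
    pvSliceLoopA d world_size =
      ((PySem.List.pyRange 0 world_size 1).map (fun i => pvCfgF d world_size i),
       (PySem.List.pyRange 0 world_size 1).map (fun i => pvOffF d world_size i)) := by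
  by_cases hws : world_size ≤ 0
  · rw [pvSliceLoopA, PySem.List.pyRange_one_eq_nil hws]
    rfl
  · have hpos : 0 < world_size := by omega
    have hrem : 0 ≤ PySem.Int.mod (d.getD "input_dim" 0) world_size := by
      rw [PySem.Int.mod_eq_emod_of_pos hpos]
      exact Int.emod_nonneg _ (by omega)
    rw [pvSliceLoopA, PySem.List.pyRange_one]
    simp only [sub_zero, zero_add]
    rw [pvInnerA_aux d world_size hrem world_size.toNat]
    simp [List.map_map, Function.comp]

-- ===== VERDICT (by name: the statement is the Claim_ definition above) =====
theorem create_row_sliced_configs_spec : Claim_equal_create_row_sliced_configs := by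
  intro g ws _ _
  unfold Spec_create_row_sliced_configs
  by_cases hg : g = []
  · subst hg
    rfl
  · rw [create_row_sliced_configs, create_row_sliced_configs_alt, if_neg hg,
      pvOuterA_acc, pvOuterB_acc]
    simp only [List.nil_append]
    have hA1 : g.map (fun cfg => (pvSliceLoopA (PySem.Dict.mk cfg) ws).1.map PySem.Dict.items) =
        g.map (fun cfg => (PySem.List.pyRange 0 ws 1).map
          (fun i => (pvCfgF (PySem.Dict.mk cfg) ws i).items)) := by
      refine List.map_congr_left (fun cfg _ => ?_)
      rw [pvSliceLoopA_eq, List.map_map]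
      rfl
    have hA2 : g.map (fun cfg => (pvSliceLoopA (PySem.Dict.mk cfg) ws).2) =
        g.map (fun cfg => (PySem.List.pyRange 0 ws 1).map
          (fun i => pvOffF (PySem.Dict.mk cfg) ws i)) := by
      refine List.map_congr_left (fun cfg _ => ?_)
      rw [pvSliceLoopA_eq]
    rw [hA1, hA2, pvZipStar_map g hg _ (fun c i => (pvCfgF (PySem.Dict.mk c) ws i).items),
      pvZipStar_map g hg _ (fun c i => pvOffF (PySem.Dict.mk c) ws i)]
    refine Prod.ext ?_ ?_ <;>
      refine List.map_congr_left (fun i _ => ?_) <;>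
        simp [pvRowB, pvRowB_eq]
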